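-- pv_equiv track=rewrite | github.com/ash-n0t-found/ml-endsem-project | section3.py | classify_channels
-- ===== SOURCE A (Python) =====
-- ECG_KW = {"ecg","ekg","cardiac","heart","bio1"}
--
-- PPG_KW = {"ppg","pleth","pulse","photo","bio2","bio3"}
--
-- def classify_channels(ch_names):
--     eeg, ecg, ppg = [], [], []
--     for ch in ch_names:
--         low = ch.lower()
--         if any(k in low for k in ECG_KW):
--             ecg.append(ch)
--         elif any(k in low for k in PPG_KW):
--             ppg.append(ch)
--         else:
--             eeg.append(ch)
--     return eeg, ecg, ppg
-- ===== SOURCE B (Python) =====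
-- ECG_KW = {"ecg","ekg","cardiac","heart","bio1"}
--
-- PPG_KW = {"ppg","pleth","pulse","photo","bio2","bio3"}
--
-- def classify_channels(ch_names):
--     def hit(ch, kws):
--         low = ch.lower()
--         return any(k in low for k in kws)
--     ecg = [ch for ch in ch_names if hit(ch, ECG_KW)]
--     ppg = [ch for ch in ch_names if not hit(ch, ECG_KW) and hit(ch, PPG_KW)]
--     eeg = [ch for ch in ch_names if not hit(ch, ECG_KW) and not hit(ch, PPG_KW)]
--     return eeg, ecg, ppg
-- ===== Notes on version B (the rewrite author's own statement) =====
-- stated objective: alternative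
-- what changed: Replaces the single priority-branching accumulator loop with three independent filter passes (ECG hits; non-ECG PPG hits; the rest), each pass stated as its own comprehension over the input.
import Mathlib
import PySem

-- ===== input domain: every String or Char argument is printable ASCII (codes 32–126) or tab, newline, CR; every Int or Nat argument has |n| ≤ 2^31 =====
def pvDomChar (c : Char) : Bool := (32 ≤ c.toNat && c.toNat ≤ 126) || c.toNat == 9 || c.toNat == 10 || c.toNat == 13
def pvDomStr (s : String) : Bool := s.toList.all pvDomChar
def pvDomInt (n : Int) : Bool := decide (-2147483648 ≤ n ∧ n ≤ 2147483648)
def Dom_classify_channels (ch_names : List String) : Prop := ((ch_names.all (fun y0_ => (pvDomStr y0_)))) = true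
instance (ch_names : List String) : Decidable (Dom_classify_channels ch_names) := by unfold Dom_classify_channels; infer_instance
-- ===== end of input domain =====

-- B replaces A's single priority-branching loop with three independent filter passes (alternative decomposition, same cost).

-- ===== PORT A =====
def pvEcgKw : List String := ["ecg", "ekg", "cardiac", "heart", "bio1"]
def pvPpgKw : List String := ["ppg", "pleth", "pulse", "photo", "bio2", "bio3"]

def classify_channels (ch_names : List String) : List String × List String × List String :=
  ch_names.foldl (fun (acc : List String × List String × List String) ch =>
    let low := PySem.Str.lower ch
    if pvEcgKw.any (fun k => PySem.Str.isIn k low) then (acc.1, acc.2.1 ++ [ch], acc.2.2)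
    else if pvPpgKw.any (fun k => PySem.Str.isIn k low) then (acc.1, acc.2.1, acc.2.2 ++ [ch])
    else (acc.1 ++ [ch], acc.2.1, acc.2.2)) ([], [], [])

-- ===== PORT B =====
def pvHit (ch : String) (kws : List String) : Bool :=
  kws.any (fun k => PySem.Str.isIn k (PySem.Str.lower ch))

def classify_channels_alt (ch_names : List String) : List String × List String × List String :=
  let ecg := ch_names.filter (fun ch => pvHit ch pvEcgKw)
  let ppg := ch_names.filter (fun ch => !pvHit ch pvEcgKw && pvHit ch pvPpgKw)
  let eeg := ch_names.filter (fun ch => !pvHit ch pvEcgKw && !pvHit ch pvPpgKw)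
  (eeg, ecg, ppg)

-- ===== PRECONDITION & SPEC =====
def Spec_classify_channels (ch_names : List String) (out : List String × List String × List String) : Prop := out = classify_channels_alt ch_names
instance (ch_names : List String) (out : List String × List String × List String) : Decidable (Spec_classify_channels ch_names out) := by unfold Spec_classify_channels; infer_instance

-- ===== CLAIM (what is proved, stated in full; the proofs are below) =====
def Claim_equal_classify_channels : Prop := ∀ (ch_names : List String), Dom_classify_channels ch_names → Spec_classify_channels ch_names (classify_channels ch_names)

-- ===== LEMMAS AND PROOFS =====

-- Loop invariant for A's fold: the accumulator is always the three filters of the prefix consumed so far.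
lemma classify_fold_inv (l : List String) (e c p : List String) :
    l.foldl (fun (acc : List String × List String × List String) ch =>
      if pvHit ch pvEcgKw then (acc.1, acc.2.1 ++ [ch], acc.2.2)
      else if pvHit ch pvPpgKw then (acc.1, acc.2.1, acc.2.2 ++ [ch])
      else (acc.1 ++ [ch], acc.2.1, acc.2.2)) (e, c, p)
    = (e ++ l.filter (fun ch => !pvHit ch pvEcgKw && !pvHit ch pvPpgKw),
       c ++ l.filter (fun ch => pvHit ch pvEcgKw),
       p ++ l.filter (fun ch => !pvHit ch pvEcgKw && pvHit ch pvPpgKw)) := by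
  induction l generalizing e c p with
  | nil => simp
  | cons x t ih =>
    simp only [List.foldl_cons, List.filter_cons]
    by_cases hx : pvHit x pvEcgKw
    · simpa [hx] using ih e (c ++ [x]) p
    · by_cases hp : pvHit x pvPpgKw
      · simpa [hx, hp] using ih e c (p ++ [x])
      · simpa [hx, hp] using ih (e ++ [x]) c p

-- ===== VERDICT (by name: the statement is the Claim_ definition above) =====
theorem classify_channels_spec : Claim_equal_classify_channels := by
  intro ch_names _
  show classify_channels ch_names = classify_channels_alt ch_names
  exact (classify_fold_inv ch_names [] [] []).trans (by simp [classify_channels_alt])
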